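-- pv_equiv track=rewrite | github.com/20CS181/LandlordOff | util.py | is_feiji
-- ===== SOURCE A (Python) =====
-- transf=['3', '4', '5', '6', '7', '8', '9', '10', 'J', 'Q', 'K','A', '2', 'x','X']
--
-- def pai_to_number(pai):
--     number=[]
--     for i in pai:
--         number.append(transf.index(i))
--     return number
--
-- def is_feiji(cards):
--     #e.g., 333444, 555777
--     flag=False
--     cards=pai_to_number(cards)
--     cards.sort()
--     length=len(cards)
--     if length !=6 :return flag
--     #每个值频率为3
--     dic = {}
--     for key in cards:
--         dic[key] = dic.get(key, 0) + 1
--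
--     for i in dic.values():
--         if i!=3 :
--             return flag
--
--     flag=True
--     return flag
-- ===== SOURCE B (Python) =====
-- transf=['3', '4', '5', '6', '7', '8', '9', '10', 'J', 'Q', 'K','A', '2', 'x','X']
--
-- def is_feiji(cards):
--     nums = sorted(transf.index(c) for c in cards)
--     if len(nums) != 6:
--         return False
--     a, b, c, d, e, f = nums
--     return a == b == c and d == e == f and c != d
-- ===== Notes on version B (the rewrite author's own statement) =====
-- stated objective: simpler
-- what changed: B drops A's frequency dictionary and its values scan entirely: it sorts the six converted cards and decides by direct positional equality (first three equal, last three equal, middle pair different).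
import Mathlib
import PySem

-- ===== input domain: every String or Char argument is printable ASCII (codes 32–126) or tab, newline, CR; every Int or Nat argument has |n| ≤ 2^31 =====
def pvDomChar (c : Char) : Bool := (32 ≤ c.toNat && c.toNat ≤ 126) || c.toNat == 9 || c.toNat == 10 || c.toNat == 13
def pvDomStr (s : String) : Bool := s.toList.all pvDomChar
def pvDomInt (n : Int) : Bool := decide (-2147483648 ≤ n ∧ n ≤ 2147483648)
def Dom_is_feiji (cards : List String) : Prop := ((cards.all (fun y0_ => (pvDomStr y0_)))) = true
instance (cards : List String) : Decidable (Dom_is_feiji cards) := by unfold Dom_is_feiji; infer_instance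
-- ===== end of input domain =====

-- B keeps A's card-to-number conversion and sort but replaces the frequency
-- dictionary and its values scan by direct positional equality checks on the
-- sorted six numbers (objective: simpler).

def transf : List String :=
  ["3", "4", "5", "6", "7", "8", "9", "10", "J", "Q", "K", "A", "2", "x", "X"]

-- ===== PORT A =====
-- transf.index(i) raises ValueError when i ∉ transf: modelled as none (excluded by Pre_).
def pai_to_number (pai : List String) : Option (List Int) :=
  pai.foldl
    (fun acc i =>
      match acc, PySem.List.index? transf i with
      | some number, some k => some (number ++ [(k : Int)])
      | _, _ => none)
    (some [])

def is_feiji (cards : List String) : Bool :=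
  match pai_to_number cards with
  | none => false   -- Python raises ValueError here; Pre_ excludes these inputs
  | some cards0 =>
    let cards1 := PySem.List.sorted cards0 (fun x => x) false
    let length : Int := cards1.length
    if length ≠ 6 then false
    else
      let dic := cards1.foldl (fun d key => d.insert key (d.getD key 0 + 1))
        (PySem.Dict.empty : PySem.Dict Int Int)
      if dic.values.all (fun i => i == 3) then true else false

-- ===== PORT B =====
def numsOf (cards : List String) : Option (List Int) :=
  match cards with
  | [] => some []
  | c :: rest =>
    match PySem.List.index? transf c, numsOf rest with
    | some k, some t => some ((k : Int) :: t)
    | _, _ => none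

def is_feiji_alt (cards : List String) : Bool :=
  match numsOf cards with
  | none => false   -- ValueError in B's generator as well; excluded by Pre_
  | some nums0 =>
    let nums := PySem.List.sorted nums0 (fun x => x) false
    if (nums.length : Int) ≠ 6 then false
    else
      match nums with
      | [a, b, c, d, e, f] => a == b && b == c && (d == e && e == f) && !(c == d)
      | _ => false

-- ===== PRECONDITION & SPEC =====
-- Pre_ excludes exactly the inputs where a card is not one of the 15 symbols:
-- there Python A raises ValueError from transf.index.
def Pre_is_feiji (cards : List String) : Prop := ∀ c ∈ cards, c ∈ transf
instance (cards : List String) : Decidable (Pre_is_feiji cards) := by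
  unfold Pre_is_feiji; infer_instance

def pvWitness_is_feiji : List String := ["3", "3", "3", "4", "4", "4"]

def Spec_is_feiji (cards : List String) (out : Bool) : Prop := out = is_feiji_alt cards
instance (cards : List String) (out : Bool) : Decidable (Spec_is_feiji cards out) := by
  unfold Spec_is_feiji; infer_instance

-- ===== CLAIM =====
def Claim_equal_is_feiji : Prop :=
  ∀ (cards : List String), Dom_is_feiji cards → Pre_is_feiji cards →
    Spec_is_feiji cards (is_feiji cards)

-- ===== LEMMAS AND PROOFS =====

-- Under Pre_, the conversion succeeds (no ValueError).
theorem numsOf_some (cards : List String) (h : ∀ c ∈ cards, c ∈ transf) :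
    (numsOf cards).isSome := by
  induction cards with
  | nil => simp [numsOf]
  | cons c rest ih =>
    have h1 : c ∈ transf := h c (by simp)
    have h2 := ih (fun x hx => h x (List.mem_cons_of_mem _ hx))
    obtain ⟨k, hk⟩ := Option.isSome_iff_exists.1
      (show (PySem.List.index? transf c).isSome by
        rw [PySem.List.index?_isSome_iff]; exact h1)
    obtain ⟨t, ht⟩ := Option.isSome_iff_exists.1 h2
    simp only [PySem.List.index?_eq_idxOf?] at hk
    simp [numsOf, ht, hk]

-- A's foldl conversion equals B's structural conversion.
theorem pai_foldl_none (pai : List String) :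
    pai.foldl
      (fun acc i =>
        match acc, PySem.List.index? transf i with
        | some number, some k => some (number ++ [(k : Int)])
        | _, _ => none)
      (none : Option (List Int)) = none := by
  induction pai with
  | nil => rfl
  | cons d t iht => simpa using iht

theorem pai_step_foldl (pai : List String) (acc : List Int) :
    pai.foldl
      (fun acc i =>
        match acc, PySem.List.index? transf i with
        | some number, some k => some (number ++ [(k : Int)])
        | _, _ => none)
      (some acc)
    = (numsOf pai).map (fun t => acc ++ t) := by
  induction pai generalizing acc with
  | nil => simp [numsOf]
  | cons c rest ih =>
    simp only [List.foldl_cons, numsOf]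
    cases hk : PySem.List.index? transf c with
    | none =>
      cases numsOf rest <;> simpa using pai_foldl_none rest
    | some k =>
      simp only []
      rw [ih (acc ++ [(k : Int)])]
      cases numsOf rest <;> simp

theorem pai_to_number_eq (cards : List String) : pai_to_number cards = numsOf cards := by
  have := pai_step_foldl cards []
  simpa [pai_to_number] using this

-- Core: on a sorted 6-list, "all counter values are 3" is the positional test.
theorem core (a b c d e f : Int)
    (h : ([a, b, c, d, e, f] : List Int).Pairwise (· ≤ ·)) :
    (([a, b, c, d, e, f].foldl (fun d k => d.insert k (d.getD k 0 + 1))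
        (PySem.Dict.empty : PySem.Dict Int Int)).values.all (fun i => i == 3))
      = (a == b && b == c && (d == e && e == f) && !(c == d)) := by
  have hg := List.pairwise_iff_getElem.1 h
  have hab : a ≤ b := by simpa using hg 0 1 (by norm_num) (by norm_num) (by norm_num)
  have hbc : b ≤ c := by simpa using hg 1 2 (by norm_num) (by norm_num) (by norm_num)
  have hcd : c ≤ d := by simpa using hg 2 3 (by norm_num) (by norm_num) (by norm_num)
  have hde : d ≤ e := by simpa using hg 3 4 (by norm_num) (by norm_num) (by norm_num)
  have hef : e ≤ f := by simpa using hg 4 5 (by norm_num) (by norm_num) (by norm_num)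
  rw [PySem.Dict.foldl_insert_getD_add_one_eq_counter]
  rw [Bool.eq_iff_iff]
  constructor
  · intro hall
    have hv : ∀ k ∈ [a, b, c, d, e, f], (([a, b, c, d, e, f] : List Int).count k : Int) = 3 := by
      intro k hk
      have hmem : ((k, (([a, b, c, d, e, f] : List Int).count k : Int)) ∈
          (PySem.Dict.counter [a, b, c, d, e, f]).items) := by
        rw [PySem.Dict.items_counter]
        exact List.mem_map.2 ⟨k, (PySem.Set.mem_ofList _ _).2 hk, rfl⟩
      have : (([a, b, c, d, e, f] : List Int).count k : Int) ∈
          (PySem.Dict.counter [a, b, c, d, e, f]).values := by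
        simp [PySem.Dict.values]
        exact ⟨k, hmem⟩
      have := List.all_eq_true.1 hall _ this
      simpa using this
    have ha := hv a (by simp); have hf := hv f (by simp)
    simp only [List.count_cons, List.count_nil, beq_iff_eq] at ha hf
    simp only [Bool.and_eq_true, beq_iff_eq, Bool.not_eq_true', beq_eq_false_iff_ne, ne_eq]
    split_ifs at ha hf <;> omega
  · intro hpat
    simp only [Bool.and_eq_true, beq_iff_eq, Bool.not_eq_true', beq_eq_false_iff_ne, ne_eq] at hpat
    obtain ⟨⟨⟨h1, h2⟩, h3, h4⟩, h5⟩ := hpat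
    subst h1; subst h2; subst h3; subst h4
    rw [List.all_eq_true]
    intro v hvmem
    simp only [PySem.Dict.values, List.mem_map] at hvmem
    obtain ⟨p, hp, hpv⟩ := hvmem
    rw [PySem.Dict.items_counter, List.mem_map] at hp
    obtain ⟨k, hkmem, rfl⟩ := hp
    have hk : k = a ∨ k = d := by simpa using (PySem.Set.mem_ofList _ _).1 hkmem
    subst hpv
    simp only [beq_iff_eq]
    rcases hk with rfl | rfl <;>
      simp only [List.count_cons, List.count_nil, beq_iff_eq] <;>
      split_ifs <;> omega

-- ===== VERDICT =====
theorem is_feiji_spec : Claim_equal_is_feiji := by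
  intro cards _ hpre
  unfold Spec_is_feiji is_feiji is_feiji_alt
  rw [pai_to_number_eq]
  cases hn : numsOf cards with
  | none => exact absurd (numsOf_some cards hpre) (by simp [hn])
  | some nums =>
    simp only []
    set l := PySem.List.sorted nums (fun x => x) false with hl
    by_cases h6 : (l.length : Int) = 6
    · have hlen : l.length = 6 := by exact_mod_cast h6
      match l, hlen with
      | [a, b, c, d, e, f], _ =>
        have hp : ([a, b, c, d, e, f] : List Int).Pairwise (· ≤ ·) := by
          have := PySem.List.sorted_pairwise nums (fun x => x)
          rw [← hl] at this
          exact this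
        rw [core a b c d e f hp]
        split <;> simp_all [beq_eq_decide]
    · rw [if_pos h6, if_pos h6]
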